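-- pv_equiv track=rewrite | github.com/TinkeringEngr/Network-Visualizer | source/utilities/utils.py | remove_inline_quotes
-- ===== SOURCE A (Python) =====
-- def remove_inline_quotes(string):
--
--     """
--     Remove inline single and dobule quotes
--     """
--
--     if string is None:
--         return None
--
--     while string.find("'") >= 0:
--         string = string.replace("'", "")
--
--     while string.find('"') >= 0:
--         string = string.replace('"', "")
--
--     return string
-- ===== SOURCE B (Python) =====
-- def remove_inline_quotes(string):
--     """Remove inline single and double quotes."""
--     if string is None:
--         return None
--     return ''.join(ch for ch in string if ch not in "'\"")
-- ===== Notes on version B (the rewrite author's own statement) =====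
-- stated objective: idiomatic
-- what changed: Replaces A's two find/replace while-loops (each rescanning and rebuilding the whole string) by a single character-level pass that keeps every character that is not a single or double quote.
import Mathlib
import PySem

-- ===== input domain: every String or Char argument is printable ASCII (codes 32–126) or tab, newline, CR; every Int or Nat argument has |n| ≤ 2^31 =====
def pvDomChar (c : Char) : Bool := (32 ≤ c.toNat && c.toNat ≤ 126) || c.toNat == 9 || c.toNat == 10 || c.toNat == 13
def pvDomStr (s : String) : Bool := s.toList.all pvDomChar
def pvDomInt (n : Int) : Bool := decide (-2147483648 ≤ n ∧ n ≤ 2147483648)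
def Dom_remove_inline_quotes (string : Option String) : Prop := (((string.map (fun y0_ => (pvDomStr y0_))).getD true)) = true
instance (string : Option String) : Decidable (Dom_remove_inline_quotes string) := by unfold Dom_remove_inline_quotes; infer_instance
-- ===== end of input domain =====

-- B replaces A's two find/replace while-loops by one character pass keeping non-quote characters (idiomatic; return value only, A rebinds its local only).

-- ===== PORT A =====
-- helper lemmas needed by the port's termination proof (cited in decreasing_by)
theorem pv_singleton_infix {α : Type} (a : α) (l : List α) : [a] <:+: l ↔ a ∈ l := by
  constructor
  · intro h
    exact h.sublist.subset (List.mem_singleton_self a)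
  · intro h
    obtain ⟨s, t, rfl⟩ := List.append_of_mem h
    exact ⟨s, t, by simp⟩

theorem pv_go_filter (q : Char) : ∀ (fuel : Nat) (l acc : List Char), l.length ≤ fuel →
    PySem.Chars.replace.go [q] [] fuel l acc = acc.reverse ++ l.filter (fun c => !(c == q)) := by
  intro fuel
  induction fuel with
  | zero =>
    intro l acc h
    have hl : l = [] := List.eq_nil_of_length_eq_zero (Nat.le_zero.mp h)
    subst hl
    simp [PySem.Chars.replace.go]
  | succ n ih =>
    intro l acc h
    cases l with
    | nil => simp [PySem.Chars.replace.go]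
    | cons c t =>
      by_cases hc : c = q
      · subst hc
        have hpre : List.isPrefixOf [c] (c :: t) = true := by simp [List.isPrefixOf]
        rw [PySem.Chars.replace.go]
        simp only [hpre, if_pos]
        rw [show List.drop [c].length (c :: t) = t from rfl]
        rw [ih t _ (Nat.lt_succ_iff.mp (by simpa using h))]
        simp
      · have hpre : List.isPrefixOf [q] (c :: t) = false := by
          simp [List.isPrefixOf, hc]
          exact fun h' => absurd h'.symm hc
        rw [PySem.Chars.replace.go]
        simp only [hpre]
        rw [if_neg (by simp [hpre])]
        rw [ih t _ (Nat.lt_succ_iff.mp (by simpa using h))]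
        simp [hc]

theorem pv_replace_single (q : Char) (l : List Char) :
    PySem.Chars.replace l [q] [] = l.filter (fun c => !(c == q)) := by
  rw [PySem.Chars.replace]
  rw [if_neg (by simp)]
  exact pv_go_filter q l.length l [] (le_refl _)

-- the while loop 'while string.find(q) >= 0: string = string.replace(q, "")' for a one-char q
def pvRemoveLoop (q : Char) (s : String) : String :=
  if 0 ≤ PySem.Str.find s (String.ofList [q]) then
    pvRemoveLoop q (PySem.Str.replace s (String.ofList [q]) "")
  else s
termination_by s.toList.length
decreasing_by
  rename_i h
  have hmem : q ∈ s.toList := by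
    have := (PySem.Str.find_nonneg_iff s (String.ofList [q])).mp h
    rw [show (String.ofList [q]).toList = [q] by simp] at this
    exact (pv_singleton_infix q s.toList).mp this
  have ht : (PySem.Str.replace s (String.ofList [q]) "").toList
      = s.toList.filter (fun c => !(c == q)) := by
    rw [PySem.Str.toList_replace]
    rw [show (String.ofList [q]).toList = [q] by simp, show ("" : String).toList = [] from rfl]
    exact pv_replace_single q s.toList
  rw [ht]
  exact List.length_filter_lt_length_iff_exists.mpr ⟨q, hmem, by simp⟩

def remove_inline_quotes (string : Option String) : Option String :=
  match string with
  | none => none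
  | some s => some (pvRemoveLoop '"' (pvRemoveLoop '\'' s))

-- ===== PORT B =====
def remove_inline_quotes_alt (string : Option String) : Option String :=
  match string with
  | none => none
  | some s =>
    some (String.ofList (s.toList.filter (fun ch => !(PySem.Chars.isIn [ch] "'\"".toList))))

-- ===== PRECONDITION & SPEC =====
def Spec_remove_inline_quotes (string : Option String) (out : Option String) : Prop := out = remove_inline_quotes_alt string
instance (string : Option String) (out : Option String) : Decidable (Spec_remove_inline_quotes string out) := by unfold Spec_remove_inline_quotes; infer_instance

-- ===== CLAIM (what is proved, stated in full; the proofs are below) =====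
def Claim_equal_remove_inline_quotes : Prop := ∀ (string : Option String), Dom_remove_inline_quotes string → Spec_remove_inline_quotes string (remove_inline_quotes string)

-- ===== LEMMAS AND PROOFS =====
theorem pv_removeLoop_eq (q : Char) (s : String) :
    pvRemoveLoop q s = String.ofList (s.toList.filter (fun c => !(c == q))) := by
  have hrep : (PySem.Str.replace s (String.ofList [q]) "").toList
      = s.toList.filter (fun c => !(c == q)) := by
    rw [PySem.Str.toList_replace]
    rw [show (String.ofList [q]).toList = [q] by simp, show ("" : String).toList = [] from rfl]
    exact pv_replace_single q s.toList
  rw [pvRemoveLoop]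
  by_cases h : 0 ≤ PySem.Str.find s (String.ofList [q])
  · rw [if_pos h]
    rw [pvRemoveLoop]
    have h2 : ¬ 0 ≤ PySem.Str.find (PySem.Str.replace s (String.ofList [q]) "") (String.ofList [q]) := by
      intro hge
      have := (PySem.Str.find_nonneg_iff _ _).mp hge
      rw [show (String.ofList [q]).toList = [q] by simp, hrep] at this
      have hq : q ∈ s.toList.filter (fun c => !(c == q)) :=
        (pv_singleton_infix q _).mp this
      simp at hq
    rw [if_neg h2]
    have : PySem.Str.replace s (String.ofList [q]) ""
        = String.ofList (PySem.Str.replace s (String.ofList [q]) "").toList :=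
      String.ofList_toList.symm
    rw [this, hrep]
  · rw [if_neg h]
    have hnot : q ∉ s.toList := by
      intro hmem
      exact h ((PySem.Str.find_nonneg_iff s (String.ofList [q])).mpr
        (by rw [show (String.ofList [q]).toList = [q] by simp]
            exact (pv_singleton_infix q s.toList).mpr hmem))
    have : s.toList.filter (fun c => !(c == q)) = s.toList :=
      List.filter_eq_self.mpr (fun c hc => by
        simp only [Bool.not_eq_eq_eq_not, Bool.not_true, beq_eq_false_iff_ne]
        exact fun he => hnot (he ▸ hc))
    rw [this]
    exact String.ofList_toList.symm

theorem pv_isIn_single (c : Char) (l : List Char) :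
    PySem.Chars.isIn [c] l = true ↔ c ∈ l := by
  rw [PySem.Chars.isIn_iff_infix]
  exact pv_singleton_infix c l

-- ===== VERDICT (by name: the statement is the Claim_ definition above) =====
theorem remove_inline_quotes_spec : Claim_equal_remove_inline_quotes := by
  intro string _
  unfold Spec_remove_inline_quotes
  cases string with
  | none => rfl
  | some s =>
    simp only [remove_inline_quotes, remove_inline_quotes_alt]
    rw [pv_removeLoop_eq, pv_removeLoop_eq]
    congr 1
    rw [show (String.ofList (s.toList.filter (fun c => !(c == '\'')))).toList
        = s.toList.filter (fun c => !(c == '\'')) by simp]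
    rw [List.filter_filter]
    apply congrArg String.ofList
    apply List.filter_congr
    intro c _
    by_cases h1 : c = '\''
    · subst h1; decide
    · by_cases h2 : c = '"'
      · subst h2; decide
      · have : PySem.Chars.isIn [c] ['\'', '"'] = false := by
          rw [Bool.eq_false_iff]
          intro ht
          have := (pv_isIn_single c _).mp ht
          simp at this
          rcases this with h | h
          · exact h1 h
          · exact h2 h
        simp [this, h1, h2]
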